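-- pv_equiv track=rewrite | github.com/cam4ani/PhD-AnimalWelfare | UTILS.py | dico_zone_sortedduration
-- ===== SOURCE A (Python) =====
-- import itertools
--
-- def dico_zone_sortedduration(li, nbr_sec):
--     '''function to find a list of duration per zone sorted from smaller to bigger'''
--     v = [(x[0], len(list(x[1]))) for x in itertools.groupby(li)]
--     v = sorted(v, key = lambda i: i[1]) #sort
--     d = {}
--     for i,j in v:
--         if i not in d:
--             d[i] = []
--         d[i].append(j*nbr_sec)
--     return d
-- ===== SOURCE B (Python) =====
-- import itertools
--
-- def dico_zone_sortedduration(li, nbr_sec):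
--     '''distribute run lengths into per-length buckets, then emit buckets in
--     ascending length order (a counting sort) instead of comparison-sorting all runs'''
--     runs = [(k, len(list(g))) for k, g in itertools.groupby(li)]
--     m = 0
--     for _, L in runs:
--         m = max(m, L)
--     buckets = {}
--     for k, L in runs:
--         buckets.setdefault(L, []).append(k)
--     d = {}
--     for L in range(1, m + 1):
--         for k in buckets.get(L, []):
--             d.setdefault(k, []).append(L * nbr_sec)
--     return d
-- ===== Notes on version B (the rewrite author's own statement) =====
-- stated objective: alternative
-- what changed: A comparison-sorts the whole run list by length and then distributes runs into the dict; B never comparison-sorts: it buckets run keys by run length in one pass and emits the buckets in ascending length order (a counting sort over lengths), yielding the same dict with the same insertion order.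
import Mathlib
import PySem

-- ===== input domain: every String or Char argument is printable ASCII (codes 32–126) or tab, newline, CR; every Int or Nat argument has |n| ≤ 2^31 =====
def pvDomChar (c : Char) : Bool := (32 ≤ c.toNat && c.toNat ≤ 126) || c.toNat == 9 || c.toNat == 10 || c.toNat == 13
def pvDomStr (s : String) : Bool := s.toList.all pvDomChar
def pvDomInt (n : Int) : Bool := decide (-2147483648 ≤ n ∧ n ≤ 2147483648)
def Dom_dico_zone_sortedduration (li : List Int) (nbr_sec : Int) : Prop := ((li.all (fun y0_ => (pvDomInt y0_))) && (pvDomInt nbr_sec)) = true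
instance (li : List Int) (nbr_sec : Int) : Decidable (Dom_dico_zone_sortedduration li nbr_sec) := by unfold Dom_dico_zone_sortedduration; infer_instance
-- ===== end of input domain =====

-- B replaces A's global comparison sort of the run list by per-length buckets emitted in
-- ascending length order (a counting sort); objective: alternative (same result, no comparison sort).

-- ===== PORT A =====
-- itertools.groupby(li) consumed as [(key, len(group)) …]: run-length encoding of consecutive
-- equal elements (exact: groupby groups maximal runs of '==' -equal elements in order)
def pyRunLengths : List Int → List (Int × Int)
  | [] => []
  | x :: xs =>
    (x, 1 + ((xs.takeWhile (· == x)).length : Int)) :: pyRunLengths (xs.dropWhile (· == x))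
termination_by l => l.length
decreasing_by
  simp only [List.length_cons]
  exact Nat.lt_succ_of_le (List.length_dropWhile_le _ _)

def dico_zone_sortedduration (li : List Int) (nbr_sec : Int) : List (Int × List Int) :=
  let v := pyRunLengths li
  let v2 := PySem.List.sorted v (fun i => i.2) false
  let d := v2.foldl (fun d ij =>
      let d' := if d.contains ij.1 then d else d.insert ij.1 []   -- if i not in d: d[i] = []
      d'.insert ij.1 (d'.getD ij.1 [] ++ [ij.2 * nbr_sec]))       -- d[i].append(j*nbr_sec)
    PySem.Dict.empty
  d.items

-- ===== PORT B =====
def dico_zone_sortedduration_alt (li : List Int) (nbr_sec : Int) : List (Int × List Int) :=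
  let runs := pyRunLengths li
  let m := runs.foldl (fun acc kL => max acc kL.2) 0
  let buckets := runs.foldl (fun b kL =>
      let b' := b.setdefault kL.2 []                               -- buckets.setdefault(L, [])
      b'.insert kL.2 (b'.getD kL.2 [] ++ [kL.1]))                  -- .append(k)
    PySem.Dict.empty
  let d := (PySem.List.pyRange 1 (m + 1)).foldl (fun d L =>
      (buckets.getD L []).foldl (fun d k =>
        let d' := d.setdefault k []                                -- d.setdefault(k, [])
        d'.insert k (d'.getD k [] ++ [L * nbr_sec])) d) PySem.Dict.empty  -- .append(L*nbr_sec)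
  d.items

-- ===== PRECONDITION & SPEC =====
def Spec_dico_zone_sortedduration (li : List Int) (nbr_sec : Int) (out : List (Int × List Int)) : Prop := out = dico_zone_sortedduration_alt li nbr_sec
instance (li : List Int) (nbr_sec : Int) (out : List (Int × List Int)) : Decidable (Spec_dico_zone_sortedduration li nbr_sec out) := by unfold Spec_dico_zone_sortedduration; infer_instance

-- ===== CLAIM (what is proved, stated in full; the proofs are below) =====
def Claim_equal_dico_zone_sortedduration : Prop := ∀ (li : List Int) (nbr_sec : Int), Dom_dico_zone_sortedduration li nbr_sec → Spec_dico_zone_sortedduration li nbr_sec (dico_zone_sortedduration li nbr_sec)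

-- ===== LEMMAS AND PROOFS =====

-- A's "if i not in d: d[i] = []" followed by append reduces to a single insert.
theorem pv_stepA_eq (d : PySem.Dict Int (List Int)) (k v : Int) :
    (let d' := if d.contains k then d else d.insert k []
     d'.insert k (d'.getD k [] ++ [v])) = d.insert k (d.getD k [] ++ [v]) := by
  by_cases h : d.contains k = true
  · simp [h]
  · simp only [h, if_neg, Bool.false_eq_true, not_false_eq_true]
    rw [PySem.Dict.getD_insert_self, PySem.Dict.insert_insert_self,
      PySem.Dict.getD_of_not_contains d [] (by simpa using h)]

-- B's "d.setdefault(k, []).append(v)" reduces to the same single insert.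
theorem pv_stepB_eq (d : PySem.Dict Int (List Int)) (k v : Int) :
    (let d' := d.setdefault k []
     d'.insert k (d'.getD k [] ++ [v])) = d.insert k (d.getD k [] ++ [v]) := by
  by_cases h : d.contains k = true
  · simp [PySem.Dict.setdefault_of_contains d [] h]
  · simp only [PySem.Dict.setdefault_of_not_contains d [] (by simpa using h)]
    rw [PySem.Dict.getD_insert_self, PySem.Dict.insert_insert_self,
      PySem.Dict.getD_of_not_contains d [] (by simpa using h)]

-- every run produced by pyRunLengths has length ≥ 1
theorem pv_runlen_pos (li : List Int) : ∀ p ∈ pyRunLengths li, 1 ≤ p.2 := by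
  induction li using pyRunLengths.induct with
  | case1 => simp [pyRunLengths]
  | case2 x xs ih =>
    intro p hp
    rw [pyRunLengths] at hp
    rcases List.mem_cons.1 hp with h | h
    · subst h; simp
    · exact ih p h

-- the bucket dict built by B: bucket L holds the keys of the runs of length L, in order
theorem pv_bucket_getD (runs : List (Int × Int)) (b : PySem.Dict Int (List Int)) (L : Int) :
    (runs.foldl (fun b kL => b.insert kL.2 (b.getD kL.2 [] ++ [kL.1])) b).getD L []
      = b.getD L [] ++ (runs.filter (fun p => p.2 == L)).map (·.1) := by
  induction runs generalizing b with
  | nil => simp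
  | cons p t ih =>
    simp only [List.foldl_cons, List.filter_cons]
    rw [ih]
    by_cases h : p.2 = L
    · simp [h]
    · simp [PySem.Dict.getD_insert, h, Ne.symm h]

theorem pv_insertBy_append (bef : (Int × Int) → (Int × Int) → Bool) (x : Int × Int)
    (ys zs : List (Int × Int)) (h : ∀ y ∈ ys, bef x y = false) :
    PySem.List.insertBy bef x (ys ++ zs) = ys ++ PySem.List.insertBy bef x zs := by
  induction ys with
  | nil => simp
  | cons y t ih =>
    simp only [List.cons_append, PySem.List.insertBy, h y (by simp)]
    simp only [Bool.false_eq_true, if_neg, not_false_eq_true, List.cons.injEq, true_and]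
    exact ih (fun z hz => h z (by simp [hz]))

theorem pv_insertBy_front (bef : (Int × Int) → (Int × Int) → Bool) (x : Int × Int)
    (zs : List (Int × Int)) (h : ∀ z ∈ zs, bef x z = true) :
    PySem.List.insertBy bef x zs = x :: zs := by
  cases zs with
  | nil => simp [PySem.List.insertBy]
  | cons z t => simp [PySem.List.insertBy, h z (by simp)]

-- the crux: a stable sort of pairs by their (second-component) length equals the
-- concatenation, over ascending lengths, of the runs of that length in original order
theorem pv_sorted_eq_flatMap (v : List (Int × Int)) (a b : Int)
    (h : ∀ p ∈ v, a ≤ p.2 ∧ p.2 < b) :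
    PySem.List.sorted v (fun p => p.2) false
      = (PySem.List.pyRange a b).flatMap (fun L => v.filter (fun p => p.2 == L)) := by
  induction v using List.reverseRecOn with
  | nil => simp [PySem.List.sorted_eq_foldl_insertBy]
  | append_singleton u x ih =>
    have hu : ∀ p ∈ u, a ≤ p.2 ∧ p.2 < b := fun p hp => h p (List.mem_append_left _ hp)
    have hx : a ≤ x.2 ∧ x.2 < b := h x (by simp)
    have hstep : PySem.List.sorted (u ++ [x]) (fun p => p.2) false
        = PySem.List.insertBy (fun p q => decide (p.2 < q.2)) x
            (PySem.List.sorted u (fun p => p.2) false) := by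
      rw [PySem.List.sorted_eq_foldl_insertBy, PySem.List.sorted_eq_foldl_insertBy,
        List.foldl_append, List.foldl_cons, List.foldl_nil]
    rw [hstep, ih hu]
    rw [PySem.List.pyRange_one_append a x.2 b hx.1 (le_of_lt hx.2),
      PySem.List.pyRange_one_cons hx.2]
    rw [List.flatMap_append, List.flatMap_cons, List.flatMap_append, List.flatMap_cons]
    have hP1 : ∀ y ∈ (PySem.List.pyRange a x.2).flatMap (fun L => u.filter (fun p => p.2 == L))
        ++ u.filter (fun p => p.2 == x.2), (fun p q : Int × Int => decide (p.2 < q.2)) x y = false := by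
      intro y hy
      rcases List.mem_append.1 hy with hy | hy
      · rcases List.mem_flatMap.1 hy with ⟨L, hL, hyL⟩
        have h1 := (PySem.List.mem_pyRange_one.1 hL).2
        have h2 := (List.mem_filter.1 hyL).2
        simp only [beq_iff_eq] at h2
        simp only [decide_eq_false_iff_not]
        omega
      · have h2 := (List.mem_filter.1 hy).2
        simp only [beq_iff_eq] at h2
        simp only [decide_eq_false_iff_not]
        omega
    have hP2 : ∀ y ∈ (PySem.List.pyRange (x.2 + 1) b).flatMap (fun L => u.filter (fun p => p.2 == L)),
        (fun p q : Int × Int => decide (p.2 < q.2)) x y = true := by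
      intro y hy
      rcases List.mem_flatMap.1 hy with ⟨L, hL, hyL⟩
      have h1 := (PySem.List.mem_pyRange_one.1 hL).1
      have h2 := (List.mem_filter.1 hyL).2
      simp only [beq_iff_eq] at h2
      simp only [decide_eq_true_eq]
      omega
    rw [← List.append_assoc,
      pv_insertBy_append _ x _ _ hP1,
      pv_insertBy_front _ x _ hP2]
    have e1 : (PySem.List.pyRange a x.2).flatMap (fun L => (u ++ [x]).filter (fun p => p.2 == L))
        = (PySem.List.pyRange a x.2).flatMap (fun L => u.filter (fun p => p.2 == L)) := by
      apply List.flatMap_congr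
      intro L hL
      have h1 := (PySem.List.mem_pyRange_one.1 hL).2
      have : (x.2 == L) = false := by simp; omega
      simp [List.filter_append, this]
    have e2 : (PySem.List.pyRange (x.2 + 1) b).flatMap (fun L => (u ++ [x]).filter (fun p => p.2 == L))
        = (PySem.List.pyRange (x.2 + 1) b).flatMap (fun L => u.filter (fun p => p.2 == L)) := by
      apply List.flatMap_congr
      intro L hL
      have h1 := (PySem.List.mem_pyRange_one.1 hL).1
      have : (x.2 == L) = false := by simp; omega
      simp [List.filter_append, this]
    have e3 : (u ++ [x]).filter (fun p => p.2 == x.2) = u.filter (fun p => p.2 == x.2) ++ [x] := by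
      simp [List.filter_append]
    rw [e1, e2, e3]
    simp

theorem dico_zone_sortedduration_spec : Claim_equal_dico_zone_sortedduration := by
  intro li nbr_sec _
  unfold Spec_dico_zone_sortedduration
  simp only [dico_zone_sortedduration, dico_zone_sortedduration_alt, pv_stepA_eq, pv_stepB_eq]
  have hpos := pv_runlen_pos li
  have hmax := (PySem.List.le_foldl_max_int (pyRunLengths li) (fun p => p.2) 0).2
  rw [pv_sorted_eq_flatMap (pyRunLengths li) 1
      ((pyRunLengths li).foldl (fun acc kL => max acc kL.2) 0 + 1)
      (fun p hp => ⟨hpos p hp, by have := hmax p hp; simp at this ⊢; omega⟩)]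
  rw [List.foldl_flatMap]
  congr 1
  apply PySem.List.foldl_congr_mem
  intro d L _
  rw [pv_bucket_getD (pyRunLengths li) PySem.Dict.empty L]
  rw [PySem.Dict.getD_empty, List.nil_append, List.foldl_map]
  apply PySem.List.foldl_congr_mem
  intro acc p hp
  have h2 := (List.mem_filter.1 hp).2
  simp only [beq_iff_eq] at h2
  rw [h2]
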